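-- pv_equiv track=rewrite | github.com/missEnergy/adventofcode | 2024/day_19.py | unique_solutions
-- ===== SOURCE A (Python) =====
-- def unique_solutions(design, towels, solutions):
--     unique_solutions = 0
--     if design in towels:
--         unique_solutions += 1
--     for i in range(len(design) - 1):
--         if design[i+1:] in towels:
--             unique_solutions += solutions[i]
--     return unique_solutions
-- ===== SOURCE B (Python) =====
-- def unique_solutions(design, towels, solutions):
--     total = 0
--     n = len(design)
--     for t in set(towels):
--         if t == design:
--             total += 1
--         elif t and len(t) < n and design.endswith(t):
--             total += solutions[n - len(t) - 1]
--     return total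
-- ===== Notes on version B (the rewrite author's own statement) =====
-- stated objective: faster
-- what changed: Instead of scanning every position of the design and testing each suffix for membership in the towel list, B iterates once over the distinct towels and tests each towel directly as a suffix of the design, reading the solution count at the index its length determines.
import Mathlib
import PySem

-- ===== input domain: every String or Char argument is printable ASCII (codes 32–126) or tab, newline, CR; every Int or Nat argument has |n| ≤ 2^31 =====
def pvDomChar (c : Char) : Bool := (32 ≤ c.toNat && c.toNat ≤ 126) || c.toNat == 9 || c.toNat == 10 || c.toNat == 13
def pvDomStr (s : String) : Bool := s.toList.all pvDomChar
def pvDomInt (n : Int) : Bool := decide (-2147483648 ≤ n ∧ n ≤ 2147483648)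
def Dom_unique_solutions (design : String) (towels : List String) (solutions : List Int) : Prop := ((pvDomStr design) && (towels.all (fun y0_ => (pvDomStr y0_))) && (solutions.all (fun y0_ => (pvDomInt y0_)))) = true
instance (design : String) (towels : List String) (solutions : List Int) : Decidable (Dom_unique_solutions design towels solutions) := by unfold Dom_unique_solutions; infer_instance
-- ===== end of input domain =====

-- B iterates over the distinct towels and tests each as a suffix of the design (O(total towel length))
-- instead of A's scan over every position of the design with a membership test of the whole towel list.
-- equivalence of the RETURN value; neither program mutates its arguments.

-- ===== PORT A =====
def unique_solutions (design : String) (towels : List String) (solutions : List Int) : Int :=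
  let u : Int := 0
  let u := if design ∈ towels then u + 1 else u
  (PySem.List.pyRange 0 (PySem.Str.len design - 1) 1).foldl
    (fun u i =>
      if PySem.Str.slice design (some (i + 1)) none ∈ towels then
        u + (PySem.List.pyGet? solutions i).getD 0
      else u) u

-- ===== PORT B =====
def unique_solutions_alt (design : String) (towels : List String) (solutions : List Int) : Int :=
  (PySem.Set.ofList towels).foldl
    (fun total t =>
      if t = design then total + 1
      else if t ≠ "" ∧ PySem.Str.len t < PySem.Str.len design ∧ PySem.Str.endswith design t then
        total + (PySem.List.pyGet? solutions (PySem.Str.len design - PySem.Str.len t - 1)).getD 0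
      else total) 0

-- ===== PRECONDITION & SPEC =====
-- Pre_ excludes exactly the inputs on which A raises IndexError: a proper suffix of the design
-- occurs among the towels but the corresponding index is past the end of `solutions`
-- (B raises IndexError on those same inputs).
def Pre_unique_solutions (design : String) (towels : List String) (solutions : List Int) : Prop :=
  ∀ k ∈ List.range (design.toList.length - 1),
    String.ofList (design.toList.drop (k + 1)) ∈ towels → k < solutions.length
instance (design : String) (towels : List String) (solutions : List Int) : Decidable (Pre_unique_solutions design towels solutions) := by unfold Pre_unique_solutions; infer_instance

def pvWitness_unique_solutions : String × List String × List Int := ("abc", ["abc", "bc", "c"], [1, 1])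

def Spec_unique_solutions (design : String) (towels : List String) (solutions : List Int) (out : Int) : Prop := out = unique_solutions_alt design towels solutions
instance (design : String) (towels : List String) (solutions : List Int) (out : Int) : Decidable (Spec_unique_solutions design towels solutions out) := by unfold Spec_unique_solutions; infer_instance

-- ===== CLAIM (what is proved, stated in full; the proofs are below) =====
def Claim_equal_unique_solutions : Prop := ∀ (design : String) (towels : List String) (solutions : List Int), Dom_unique_solutions design towels solutions → Pre_unique_solutions design towels solutions → Spec_unique_solutions design towels solutions (unique_solutions design towels solutions)

-- ===== LEMMAS AND PROOFS =====

lemma pv_pyRange_pred (n : Nat) :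
    PySem.List.pyRange 0 ((n : Int) - 1) 1 = (List.range (n - 1)).map (fun k : Nat => (k : Int)) := by
  cases n with
  | zero => rfl
  | succ m =>
      have h : ((m + 1 : Nat) : Int) - 1 = (m : Int) := by push_cast; ring
      rw [h, Nat.add_sub_cancel]
      exact PySem.List.pyRange_zero_natCast m

lemma pv_toList_eq_nil (t : String) : t = "" ↔ t.toList = [] := by
  rw [← String.toList_inj]; rfl

lemma portA_eq (design : String) (towels : List String) (s : List Int) :
    unique_solutions design towels s =
      (if design ∈ towels then (1 : Int) else 0)
      + ((List.range (design.toList.length - 1)).map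
          (fun k => if String.ofList (design.toList.drop (k + 1)) ∈ towels
                    then (s[k]?).getD 0 else (0 : Int))).sum := by
  unfold unique_solutions
  rw [PySem.Str.len_eq, pv_pyRange_pred, List.foldl_map]
  rw [PySem.List.foldl_congr_mem _ _
      (fun acc k => acc + if String.ofList (design.toList.drop (k + 1)) ∈ towels
                          then (s[k]?).getD 0 else (0 : Int)) _ ?_]
  · rw [PySem.List.foldl_add]
    split <;> simp
  · intro acc k hk
    dsimp only
    have hslice : PySem.Str.slice design (some ((k : Int) + 1)) none
        = String.ofList (design.toList.drop (k + 1)) := by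
      apply String.toList_injective
      rw [PySem.Str.toList_slice, String.toList_ofList, PySem.Chars.slice_eq_listSlice]
      have h1 : ((k : Int) + 1) = ((k + 1 : Nat) : Int) := by push_cast; ring
      rw [h1, PySem.List.slice_from_natCast]
    rw [hslice, PySem.List.pyGet?_natCast]
    by_cases hm : String.ofList (design.toList.drop (k + 1)) ∈ towels
    · rw [if_pos hm, if_pos hm]
    · rw [if_neg hm, if_neg hm]; ring

lemma portB_eq (design : String) (towels : List String) (s : List Int) :
    unique_solutions_alt design towels s =
      ((PySem.Set.ofList towels).map (fun t => if t = design then (1 : Int) else 0)).sum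
      + ((PySem.Set.ofList towels).map
          (fun t => if t.toList ≠ [] ∧ t.toList.length < design.toList.length ∧ t.toList <:+ design.toList
                    then (s[design.toList.length - t.toList.length - 1]?).getD 0 else (0 : Int))).sum := by
  unfold unique_solutions_alt
  rw [PySem.List.foldl_congr_mem _ _
      (fun acc t => acc + ((if t = design then (1 : Int) else 0)
        + (if t.toList ≠ [] ∧ t.toList.length < design.toList.length ∧ t.toList <:+ design.toList
           then (s[design.toList.length - t.toList.length - 1]?).getD 0 else (0 : Int)))) _ ?_]
  · rw [PySem.List.foldl_add, PySem.List.sum_map_add_int, zero_add]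
  · intro acc t ht
    dsimp only
    by_cases hd : t = design
    · subst hd
      have hno : ¬ (t.toList ≠ [] ∧ t.toList.length < t.toList.length ∧ t.toList <:+ t.toList) := by
        rintro ⟨-, h, -⟩; omega
      rw [if_pos rfl, if_pos rfl, if_neg hno]
      ring
    · have hcond : (t ≠ "" ∧ PySem.Str.len t < PySem.Str.len design ∧ PySem.Str.endswith design t = true)
          ↔ (t.toList ≠ [] ∧ t.toList.length < design.toList.length ∧ t.toList <:+ design.toList) := by
        rw [PySem.Str.len_eq, PySem.Str.len_eq, PySem.Str.endswith_eq, PySem.Chars.endswith_iff,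
            ne_eq, pv_toList_eq_nil]
        constructor
        · rintro ⟨h1, h2, h3⟩; exact ⟨h1, by exact_mod_cast h2, h3⟩
        · rintro ⟨h1, h2, h3⟩; exact ⟨h1, by exact_mod_cast h2, h3⟩
      simp only [if_neg hd, hcond]
      by_cases hq : t.toList ≠ [] ∧ t.toList.length < design.toList.length ∧ t.toList <:+ design.toList
      · have hidx : PySem.Str.len design - PySem.Str.len t - 1
            = ((design.toList.length - t.toList.length - 1 : Nat) : Int) := by
          rw [PySem.Str.len_eq, PySem.Str.len_eq]
          omega
        rw [if_pos hq, if_pos hq, hidx, PySem.List.pyGet?_natCast]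
        ring
      · rw [if_neg hq, if_neg hq]
        ring

lemma indicator_sum (design : String) (towels : List String) :
    ((PySem.Set.ofList towels).map (fun t => if t = design then (1 : Int) else 0)).sum
      = if design ∈ towels then (1 : Int) else 0 := by
  have hb : (fun t => if t = design then (1 : Int) else 0)
      = fun t => if (t == design) = true then (1 : Int) else 0 := by
    funext t; simp
  rw [hb, PySem.List.sum_map_ite_one_zero, ← List.count_eq_countP]
  by_cases hm : design ∈ towels
  · rw [List.count_eq_one_of_mem (PySem.Set.nodup_ofList towels)
        ((PySem.Set.mem_ofList towels design).mpr hm), if_pos hm]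
    rfl
  · rw [List.count_eq_zero_of_not_mem
        (fun h => hm ((PySem.Set.mem_ofList towels design).mp h)), if_neg hm]
    rfl

lemma main_sum (design : String) (towels : List String) (s : List Int) :
    ((PySem.Set.ofList towels).map
        (fun t => if t.toList ≠ [] ∧ t.toList.length < design.toList.length ∧ t.toList <:+ design.toList
                  then (s[design.toList.length - t.toList.length - 1]?).getD 0 else (0 : Int))).sum
    = ((List.range (design.toList.length - 1)).map
        (fun k => if String.ofList (design.toList.drop (k + 1)) ∈ towels
                  then (s[k]?).getD 0 else (0 : Int))).sum := by
  rw [← List.sum_toFinset _ (PySem.Set.nodup_ofList towels),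
      ← List.sum_toFinset _ (List.nodup_range), List.toFinset_range,
      ← Finset.sum_filter, ← Finset.sum_filter]
  apply Finset.sum_nbij'
      (i := fun t => design.toList.length - t.toList.length - 1)
      (j := fun k => String.ofList (design.toList.drop (k + 1)))
  · intro t ht
    rw [Finset.mem_filter, List.mem_toFinset] at ht
    obtain ⟨htD, hne, hlt, hsuf⟩ := ht
    have hpos : 0 < t.toList.length := List.length_pos_iff.mpr hne
    have hdrop : t.toList = design.toList.drop (design.toList.length - t.toList.length) :=
      List.suffix_iff_eq_drop.mp hsuf
    rw [Finset.mem_filter, Finset.mem_range]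
    constructor
    · omega
    · have h1 : design.toList.length - t.toList.length - 1 + 1
          = design.toList.length - t.toList.length := by omega
      rw [h1, ← hdrop, String.ofList_toList]
      exact (PySem.Set.mem_ofList towels t).mp htD
  · intro k hk
    rw [Finset.mem_filter, Finset.mem_range] at hk
    obtain ⟨hklt, hmem⟩ := hk
    rw [Finset.mem_filter, List.mem_toFinset]
    have hlen : (design.toList.drop (k + 1)).length = design.toList.length - (k + 1) :=
      List.length_drop
    refine ⟨(PySem.Set.mem_ofList towels _).mpr hmem, ?_, ?_, ?_⟩
    · rw [String.toList_ofList]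
      intro h
      have h2 := congrArg List.length h
      rw [hlen, List.length_nil] at h2
      omega
    · rw [String.toList_ofList, hlen]; omega
    · rw [String.toList_ofList]; exact List.drop_suffix _ _
  · intro t ht
    rw [Finset.mem_filter, List.mem_toFinset] at ht
    obtain ⟨htD, hne, hlt, hsuf⟩ := ht
    have hpos : 0 < t.toList.length := List.length_pos_iff.mpr hne
    have hdrop : t.toList = design.toList.drop (design.toList.length - t.toList.length) :=
      List.suffix_iff_eq_drop.mp hsuf
    have h1 : design.toList.length - t.toList.length - 1 + 1
        = design.toList.length - t.toList.length := by omega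
    simp only [h1, ← hdrop, String.ofList_toList]
  · intro k hk
    rw [Finset.mem_filter, Finset.mem_range] at hk
    obtain ⟨hklt, hmem⟩ := hk
    have hlen : (design.toList.drop (k + 1)).length = design.toList.length - (k + 1) :=
      List.length_drop
    simp only [String.toList_ofList, hlen]
    omega
  · intro t ht
    rfl

lemma ports_eq (design : String) (towels : List String) (s : List Int) :
    unique_solutions design towels s = unique_solutions_alt design towels s := by
  rw [portA_eq, portB_eq, indicator_sum, main_sum]

-- ===== VERDICT (by name: the statement is the Claim_ definition above) =====
theorem unique_solutions_spec : Claim_equal_unique_solutions := by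
  intro design towels solutions _ _
  unfold Spec_unique_solutions
  exact ports_eq design towels solutions
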